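-- pv_equiv track=rewrite | github.com/feirik/Writeups | guessing_game_4/solve.py | make_list_ninth
-- ===== SOURCE A (Python) =====
-- def make_list_ninth(false_count_list):
--     zero_false_list = []
--     one_false_list = []
--     two_false_list = []
--     three_false_list = []
--
--     iter = 0
--     for i in false_count_list:
--         if i == 0:
--             zero_false_list.append(iter)
--         if i == 1:
--             one_false_list.append(iter)
--         if i == 2:
--             two_false_list.append(iter)
--         if i == 3:
--             three_false_list.append(iter)
--         iter += 1
--
--     remove_zero = zero_false_list[0:8]
--     remove_one = one_false_list[:64]
--     remove_two = two_false_list[:224]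
--     remove_three = three_false_list[:448]
--
--     test_list = remove_zero + remove_one + remove_two + remove_three
--
--     return test_list
-- ===== SOURCE B (Python) =====
-- def make_list_ninth(false_count_list):
--     result = []
--     for value, cap in [(0, 8), (1, 64), (2, 224), (3, 448)]:
--         result += [i for i, v in enumerate(false_count_list) if v == value][:cap]
--     return result
-- ===== Notes on version B (the rewrite author's own statement) =====
-- stated objective: simpler
-- what changed: Replaces the single simultaneous pass into four named bucket lists (with a manual index counter) by four independent capped filtered scans over enumerate, one per target value, concatenated in order.
import Mathlib
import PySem

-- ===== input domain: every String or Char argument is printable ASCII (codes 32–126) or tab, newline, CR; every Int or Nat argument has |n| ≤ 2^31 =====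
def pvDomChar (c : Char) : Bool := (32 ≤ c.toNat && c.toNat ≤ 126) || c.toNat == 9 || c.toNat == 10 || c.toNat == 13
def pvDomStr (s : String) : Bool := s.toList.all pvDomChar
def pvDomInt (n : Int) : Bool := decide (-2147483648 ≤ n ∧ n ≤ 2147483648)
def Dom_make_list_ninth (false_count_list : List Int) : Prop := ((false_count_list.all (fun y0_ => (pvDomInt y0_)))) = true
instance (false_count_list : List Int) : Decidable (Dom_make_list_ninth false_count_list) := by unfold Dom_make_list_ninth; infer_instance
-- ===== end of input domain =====

-- B replaces A's single pass into four bucket lists by four independent capped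
-- filtered scans, one per target value, concatenated (objective: simpler).

-- ===== PORT A =====
-- one pass: state = (zero, one, two, three, iter); four independent ifs, iter += 1
def make_list_ninth (false_count_list : List Int) : List Int :=
  let st := false_count_list.foldl
    (fun (st : List Int × List Int × List Int × List Int × Int) i =>
      let z := if i == 0 then st.1 ++ [st.2.2.2.2] else st.1
      let o := if i == 1 then st.2.1 ++ [st.2.2.2.2] else st.2.1
      let t := if i == 2 then st.2.2.1 ++ [st.2.2.2.2] else st.2.2.1
      let h := if i == 3 then st.2.2.2.1 ++ [st.2.2.2.2] else st.2.2.2.1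
      (z, o, t, h, st.2.2.2.2 + 1))
    ([], [], [], [], 0)
  let remove_zero := PySem.List.slice st.1 (some 0) (some 8)
  let remove_one := PySem.List.slice st.2.1 none (some 64)
  let remove_two := PySem.List.slice st.2.2.1 none (some 224)
  let remove_three := PySem.List.slice st.2.2.2.1 none (some 448)
  remove_zero ++ remove_one ++ remove_two ++ remove_three

-- ===== PORT B =====
-- four separate scans: for each (value, cap), indices where the element equals value, capped
def make_list_ninth_alt (false_count_list : List Int) : List Int :=
  [((0 : Int), (8 : Int)), (1, 64), (2, 224), (3, 448)].foldl
    (fun res p =>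
      res ++ PySem.List.slice
        (((PySem.List.enumerate false_count_list 0).filter (fun q => q.2 == p.1)).map (·.1))
        none (some p.2))
    []

-- ===== PRECONDITION & SPEC =====
def Spec_make_list_ninth (false_count_list : List Int) (out : List Int) : Prop := out = make_list_ninth_alt false_count_list
instance (false_count_list : List Int) (out : List Int) : Decidable (Spec_make_list_ninth false_count_list out) := by unfold Spec_make_list_ninth; infer_instance

-- ===== CLAIM (what is proved, stated in full; the proofs are below) =====
def Claim_equal_make_list_ninth : Prop := ∀ (false_count_list : List Int), Dom_make_list_ninth false_count_list → Spec_make_list_ninth false_count_list (make_list_ninth false_count_list)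

-- ===== LEMMAS AND PROOFS =====

-- characterisation of A's loop: each bucket is the filtered-index list for its value
theorem aLoop_eq (xs : List Int) (z o t h : List Int) (it : Int) :
    xs.foldl
      (fun (st : List Int × List Int × List Int × List Int × Int) i =>
        let z := if i == 0 then st.1 ++ [st.2.2.2.2] else st.1
        let o := if i == 1 then st.2.1 ++ [st.2.2.2.2] else st.2.1
        let t := if i == 2 then st.2.2.1 ++ [st.2.2.2.2] else st.2.2.1
        let h := if i == 3 then st.2.2.2.1 ++ [st.2.2.2.2] else st.2.2.2.1
        (z, o, t, h, st.2.2.2.2 + 1))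
      (z, o, t, h, it)
    = (z ++ ((PySem.List.enumerate xs it).filter (fun q => q.2 == 0)).map (·.1),
       o ++ ((PySem.List.enumerate xs it).filter (fun q => q.2 == 1)).map (·.1),
       t ++ ((PySem.List.enumerate xs it).filter (fun q => q.2 == 2)).map (·.1),
       h ++ ((PySem.List.enumerate xs it).filter (fun q => q.2 == 3)).map (·.1),
       it + xs.length) := by
  induction xs generalizing z o t h it with
  | nil => simp [PySem.List.enumerate_nil]
  | cons x xs ih =>
    simp only [List.foldl_cons, PySem.List.enumerate_cons, List.filter_cons]
    rw [ih]
    by_cases h0 : x = 0 <;> by_cases h1 : x = 1 <;> by_cases h2 : x = 2 <;> by_cases h3 : x = 3 <;>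
      simp_all <;> omega

theorem make_list_ninth_spec : Claim_equal_make_list_ninth := by
  unfold Claim_equal_make_list_ninth
  intro xs _
  unfold Spec_make_list_ninth make_list_ninth make_list_ninth_alt
  simp only [List.foldl_cons, List.foldl_nil, aLoop_eq, List.nil_append, List.append_assoc]
  simp

-- ===== VERDICT (by name: the statement is the Claim_ definition above) =====
-- (theorem make_list_ninth_spec is stated and proved just above, by name)
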